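-- pv_equiv track=rewrite | github.com/yagrawal24/golden-globe-337 | nom.py | can_consolidate
-- ===== SOURCE A (Python) =====
-- def can_consolidate(name1, name2):
--     keywords = [
--         "Actor", "Actress", "Director", "Screenplay", "Singer", "Composer",
--         "Entertainer", "Songwriter", "Performer", "Producer", "Cinematographer",
--         "Editor", "Musician", "Host", "Presenter", "Writer", "Animator",
--         "Designer", "Artist", "Documentary", "Short", "Series", "Feature",
--         "Television", "Film", "Movie", "Drama", "Comedy", "Supporting",
--         "Lead", "Ensemble", "Vocalist", "Cast", "Voice", "Newcomer",
--         "Debut", "Breakthrough", "Soundtrack", "Score", "Original",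
--         "Visual Effects", "Stunt", "Choreographer", "Makeup", "Costume",
--         "Production", "Set", "Lighting", "Special Effects", "Casting",
--         "Narrator", "Voiceover", "Reality", "Variety", "Talk Show", "Game Show"
--     ]
--     for keyword in keywords:
--         if (keyword in name1 and keyword not in name2) or (keyword in name2 and keyword not in name1):
--             return False
--     return True
-- ===== SOURCE B (Python) =====
-- KEYWORDS = [
--     "Actor", "Actress", "Director", "Screenplay", "Singer", "Composer",
--     "Entertainer", "Songwriter", "Performer", "Producer", "Cinematographer",
--     "Editor", "Musician", "Host", "Presenter", "Writer", "Animator",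
--     "Designer", "Artist", "Documentary", "Short", "Series", "Feature",
--     "Television", "Film", "Movie", "Drama", "Comedy", "Supporting",
--     "Lead", "Ensemble", "Vocalist", "Cast", "Voice", "Newcomer",
--     "Debut", "Breakthrough", "Soundtrack", "Score", "Original",
--     "Visual Effects", "Stunt", "Choreographer", "Makeup", "Costume",
--     "Production", "Set", "Lighting", "Special Effects", "Casting",
--     "Narrator", "Voiceover", "Reality", "Variety", "Talk Show", "Game Show"
-- ]
--
-- # keywords indexed by their first character: the candidates to try at an offset
-- _BY_FIRST = {}
-- for _k in KEYWORDS: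
--     _BY_FIRST.setdefault(_k[0], []).append(_k)
--
--
-- def _hits(name):
--     # Text-driven matcher: walk every offset of the name and record the
--     # keywords that match AT that offset, trying only the keywords whose
--     # first character is the character found there.
--     hits = set()
--     for i, c in enumerate(name):
--         for k in _BY_FIRST.get(c, ()):
--             if name.startswith(k, i):
--                 hits.add(k)
--     return hits
--
--
-- def can_consolidate(name1, name2):
--     return _hits(name1) == _hits(name2)
-- ===== Notes on version B (the rewrite author's own statement) =====
-- stated objective: alternative
-- what changed: B replaces A's keyword-driven scan ('keyword in name' per keyword, early return on first mismatch) with a text-driven matcher over a first-character index: it walks every offset of each name, tries only the keywords indexed under the character at that offset with startswith, collects the hit sets and compares them; no substring-containment test or early exit remains.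
import Mathlib
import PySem

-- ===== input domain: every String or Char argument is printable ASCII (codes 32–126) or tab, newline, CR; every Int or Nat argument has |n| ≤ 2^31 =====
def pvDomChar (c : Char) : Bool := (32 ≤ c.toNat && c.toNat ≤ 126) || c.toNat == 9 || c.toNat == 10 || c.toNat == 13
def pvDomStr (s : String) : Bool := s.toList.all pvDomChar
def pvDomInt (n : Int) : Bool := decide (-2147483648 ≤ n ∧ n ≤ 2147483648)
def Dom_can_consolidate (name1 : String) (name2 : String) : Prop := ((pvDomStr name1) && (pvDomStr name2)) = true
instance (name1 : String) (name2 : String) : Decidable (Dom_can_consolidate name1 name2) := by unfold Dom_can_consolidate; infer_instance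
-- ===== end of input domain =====

-- B replaces A's keyword-driven substring scan with a text-driven matcher over a
-- first-character index: it walks every offset of each name, tries only the keywords
-- indexed under the character found there, collects the hit sets and compares them
-- (objective: alternative; no speed claim).

-- the fixed keyword list both versions share
def pvKeywords : List String := [
  "Actor", "Actress", "Director", "Screenplay", "Singer", "Composer",
  "Entertainer", "Songwriter", "Performer", "Producer", "Cinematographer",
  "Editor", "Musician", "Host", "Presenter", "Writer", "Animator",
  "Designer", "Artist", "Documentary", "Short", "Series", "Feature",
  "Television", "Film", "Movie", "Drama", "Comedy", "Supporting",
  "Lead", "Ensemble", "Vocalist", "Cast", "Voice", "Newcomer",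
  "Debut", "Breakthrough", "Soundtrack", "Score", "Original",
  "Visual Effects", "Stunt", "Choreographer", "Makeup", "Costume",
  "Production", "Set", "Lighting", "Special Effects", "Casting",
  "Narrator", "Voiceover", "Reality", "Variety", "Talk Show", "Game Show"]

-- ===== PORT A =====
-- A's 'for keyword in keywords: if … return False' / 'return True' loop
def pvLoopA : List String → String → String → Bool
  | [], _, _ => true
  | k :: rest, n1, n2 =>
    if (PySem.Str.isIn k n1 && !PySem.Str.isIn k n2)
        || (PySem.Str.isIn k n2 && !PySem.Str.isIn k n1) then false
    else pvLoopA rest n1 n2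

def can_consolidate (name1 : String) (name2 : String) : Bool :=
  pvLoopA pvKeywords name1 name2

-- ===== PORT B =====
-- Source B's '_BY_FIRST': for _k in KEYWORDS: _BY_FIRST.setdefault(_k[0], []).append(_k)
-- (setdefault+append = Dict.modify with default []; _k[0] on the nonempty literal
-- keywords is headD — exact here, every keyword is nonempty)
def pvByFirst : PySem.Dict Char (List String) :=
  pvKeywords.foldl
    (fun d k => PySem.Dict.modify d (k.toList.headD 'A') [] (fun t => t ++ [k]))
    PySem.Dict.empty

-- Python's name.startswith(k, i): exact for 0 ≤ i (the only offsets B uses)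
def pvStartsAt (name k : String) (i : Int) : Bool :=
  List.isPrefixOf k.toList (name.toList.drop i.toNat)

-- Source B's '_hits': for i, c in enumerate(name): for k in _BY_FIRST.get(c, ()): if name.startswith(k, i): hits.add(k)
def pvHits (name : String) : PySem.Set String :=
  (PySem.List.enumerate name.toList 0).foldl
    (fun s ic => (PySem.Dict.getD pvByFirst ic.2 []).foldl
      (fun s k => if pvStartsAt name k ic.1 then PySem.Set.add s k else s) s)
    PySem.Set.empty

def can_consolidate_alt (name1 : String) (name2 : String) : Bool :=
  PySem.Set.equal (pvHits name1) (pvHits name2)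

-- ===== PRECONDITION & SPEC =====
def Spec_can_consolidate (name1 : String) (name2 : String) (out : Bool) : Prop := out = can_consolidate_alt name1 name2
instance (name1 : String) (name2 : String) (out : Bool) : Decidable (Spec_can_consolidate name1 name2 out) := by unfold Spec_can_consolidate; infer_instance

-- ===== CLAIM (what is proved, stated in full; the proofs are below) =====
def Claim_equal_can_consolidate : Prop := ∀ (name1 : String) (name2 : String), Dom_can_consolidate name1 name2 → Spec_can_consolidate name1 name2 (can_consolidate name1 name2)

-- ===== LEMMAS AND PROOFS =====

-- A's loop answers: every keyword matches both names or neither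
theorem pvLoopA_eq_all (l : List String) (n1 n2 : String) :
    pvLoopA l n1 n2 = l.all (fun k => PySem.Str.isIn k n1 == PySem.Str.isIn k n2) := by
  induction l with
  | nil => rfl
  | cons k rest ih =>
    simp only [pvLoopA, List.all_cons, ih]
    cases h1 : PySem.Str.isIn k n1 <;> cases h2 : PySem.Str.isIn k n2 <;> simp

-- contents of the first-character index
theorem pv_mem_group_fold (l : List String) (d0 : PySem.Dict Char (List String)) (c : Char) (y : String) :
    (y ∈ PySem.Dict.getD
        (l.foldl (fun d k => PySem.Dict.modify d (k.toList.headD 'A') [] (fun t => t ++ [k])) d0) c [])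
      ↔ y ∈ PySem.Dict.getD d0 c [] ∨ (y ∈ l ∧ y.toList.headD 'A' = c) := by
  induction l generalizing d0 with
  | nil => simp
  | cons k rest ih =>
    simp only [List.foldl_cons, ih, PySem.Dict.getD_modify, List.mem_cons]
    by_cases hc : c = k.toList.headD 'A'
    · simp only [if_pos hc, List.mem_append, List.mem_singleton]
      constructor
      · rintro ((hd | rfl) | hr)
        · exact Or.inl (hc ▸ hd)
        · exact Or.inr ⟨Or.inl rfl, hc.symm⟩
        · exact Or.inr ⟨Or.inr hr.1, hr.2⟩
      · rintro (hd | ⟨rfl | hr, hh⟩)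
        · exact Or.inl (Or.inl (hc ▸ hd))
        · exact Or.inl (Or.inr rfl)
        · exact Or.inr ⟨hr, hh⟩
    · simp only [if_neg hc]
      constructor
      · rintro (hd | hr)
        · exact Or.inl hd
        · exact Or.inr ⟨Or.inr hr.1, hr.2⟩
      · rintro (hd | ⟨rfl | hr, hh⟩)
        · exact Or.inl hd
        · exact absurd hh.symm hc
        · exact Or.inr ⟨hr, hh⟩

theorem pv_mem_byFirst (c : Char) (y : String) :
    y ∈ PySem.Dict.getD pvByFirst c [] ↔ y ∈ pvKeywords ∧ y.toList.headD 'A' = c := by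
  unfold pvByFirst
  rw [pv_mem_group_fold]
  simp [PySem.Dict.getD]

-- membership in the inner candidate fold
theorem pv_mem_inner (name : String) (i : Int) (l : List String) (s : PySem.Set String) (y : String) :
    (y ∈ l.foldl (fun s k => if pvStartsAt name k i then PySem.Set.add s k else s) s)
      ↔ y ∈ s ∨ (y ∈ l ∧ pvStartsAt name y i = true) := by
  induction l generalizing s with
  | nil => simp
  | cons k rest ih =>
    simp only [List.foldl_cons, ih]
    by_cases h : pvStartsAt name k i = true
    · simp only [h, if_pos, PySem.Set.mem_add, List.mem_cons]
      constructor
      · rintro (⟨hs | rfl⟩ | hr)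
        · exact Or.inl hs
        · exact Or.inr ⟨Or.inl rfl, h⟩
        · exact Or.inr ⟨Or.inr hr.1, hr.2⟩
      · rintro (hs | ⟨rfl | hr, hp⟩)
        · exact Or.inl (Or.inl hs)
        · exact Or.inl (Or.inr rfl)
        · exact Or.inr ⟨hr, hp⟩
    · simp only [if_neg h, List.mem_cons]
      constructor
      · rintro (hs | hr)
        · exact Or.inl hs
        · exact Or.inr ⟨Or.inr hr.1, hr.2⟩
      · rintro (hs | ⟨rfl | hr, hp⟩)
        · exact Or.inl hs
        · exact absurd hp h
        · exact Or.inr ⟨hr, hp⟩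

-- membership in the outer offset fold, candidate list depending on the offset
theorem pv_mem_outer (name : String) (cand : Int → List String) (r : List Int)
    (s : PySem.Set String) (y : String) :
    (y ∈ r.foldl (fun s i => (cand i).foldl
        (fun s k => if pvStartsAt name k i then PySem.Set.add s k else s) s) s)
      ↔ y ∈ s ∨ ∃ i ∈ r, y ∈ cand i ∧ pvStartsAt name y i = true := by
  induction r generalizing s with
  | nil => simp
  | cons i rest ih =>
    simp only [List.foldl_cons, ih, pv_mem_inner, List.mem_cons]
    constructor
    · rintro ((hs | ⟨hk, hp⟩) | ⟨j, hj, hk, hp⟩)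
      · exact Or.inl hs
      · exact Or.inr ⟨i, Or.inl rfl, hk, hp⟩
      · exact Or.inr ⟨j, Or.inr hj, hk, hp⟩
    · rintro (hs | ⟨j, (rfl | hj), hk, hp⟩)
      · exact Or.inl (Or.inl hs)
      · exact Or.inl (Or.inr ⟨hk, hp⟩)
      · exact Or.inr ⟨j, hj, hk, hp⟩

-- every keyword is a nonempty string
theorem pv_keywords_ne_nil : ∀ y ∈ pvKeywords, y.toList ≠ [] := by decide

-- a keyword is in the hit set iff it occurs as a substring of the name
theorem pv_mem_hits (name y : String) :
    y ∈ pvHits name ↔ y ∈ pvKeywords ∧ PySem.Str.isIn y name = true := by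
  unfold pvHits
  rw [PySem.List.enumerate_eq_map_pyRange name.toList 'A', List.foldl_map]
  rw [pv_mem_outer name
    (fun i => PySem.Dict.getD pvByFirst (PySem.List.pyGetD name.toList i 'A') [])]
  simp only [PySem.Set.empty, List.not_mem_nil, false_or, PySem.List.mem_pyRange_one,
    pv_mem_byFirst, PySem.Str.isIn_iff_infix]
  constructor
  · rintro ⟨i, hi, ⟨hk, _⟩, hp⟩
    refine ⟨hk, ?_⟩
    have hpre : y.toList <+: name.toList.drop i.toNat :=
      List.isPrefixOf_iff_prefix.mp hp
    exact hpre.isInfix.trans (List.drop_suffix _ _).isInfix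
  · rintro ⟨hk, u, v, huv⟩
    obtain ⟨h, t, hy⟩ : ∃ h t, y.toList = h :: t := by
      cases hyl : y.toList with
      | nil => exact absurd hyl (pv_keywords_ne_nil y hk)
      | cons h t => exact ⟨h, t, rfl⟩
    have hlen : u.length < name.toList.length := by
      rw [← huv, hy]; simp
    have hdrop : name.toList.drop u.length = y.toList ++ v := by
      rw [← huv, List.append_assoc, List.drop_left' rfl]
    refine ⟨(u.length : Int), ?_, ⟨⟨hk, ?_⟩, ?_⟩⟩
    · constructor
      · positivity
      · simp only [PySem.List.len_eq]; omega
    · -- the character at offset u.length is y's first character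
      rw [PySem.List.pyGetD_eq_getElem name.toList 'A' (by positivity)
          (by exact_mod_cast hlen)]
      simp only [Int.toNat_natCast]
      have : name.toList[u.length] = (name.toList.drop u.length).head
          (by rw [hdrop, hy]; simp) := by
        rw [List.head_drop]
      rw [this]
      have : (name.toList.drop u.length).head (by rw [hdrop, hy]; simp) = h := by
        simp [hdrop, hy]
      rw [this, hy]; rfl
    · unfold pvStartsAt
      rw [List.isPrefixOf_iff_prefix]
      simp only [Int.toNat_natCast, hdrop]
      exact List.prefix_append _ _

-- ===== VERDICT (by name: the statement is the Claim_ definition above) =====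
theorem can_consolidate_spec : Claim_equal_can_consolidate := by
  intro name1 name2 _
  unfold Spec_can_consolidate can_consolidate can_consolidate_alt
  rw [pvLoopA_eq_all, Bool.eq_iff_iff, List.all_eq_true, PySem.Set.equal_iff]
  simp only [pv_mem_hits, beq_iff_eq]
  constructor
  · intro h x
    constructor
    · rintro ⟨hk, hi⟩; exact ⟨hk, (h x hk) ▸ hi⟩
    · rintro ⟨hk, hi⟩; exact ⟨hk, (h x hk).symm ▸ hi⟩
  · intro h k hk
    have := h k
    cases h1 : PySem.Str.isIn k name1 <;> cases h2 : PySem.Str.isIn k name2 <;>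
      simp_all
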